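-- pv_equiv track=rewrite | github.com/bagusekosaputro/latihan | problem_solving/basic/maximum_value.py | sumValues
-- ===== SOURCE A (Python) =====
-- def sumValues(arr, amount):
--     total = arr[0]
--     step = 0
--     for i in arr[1:]:
--         if total > amount:
--             break
--         total += i
--         step += 1
--     return step
-- ===== SOURCE B (Python) =====
-- def sumValues(arr, amount):
--     # Phase 1: build the full prefix-sum table.
--     total = arr[0]
--     prefix = [total]
--     for x in arr[1:]:
--         total += x
--         prefix.append(total)
--     # Phase 2: find the first prefix (excluding the last) exceeding amount.
--     for k in range(len(prefix) - 1):
--         if prefix[k] > amount: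
--             return k
--     return len(arr) - 1
-- ===== Notes on version B (the rewrite author's own statement) =====
-- stated objective: alternative
-- what changed: A's fused accumulate-and-break loop is split into two separate phases: building the complete prefix-sum table, then a distinct scan that returns the first index (among all but the last) whose prefix sum exceeds amount, falling back to len(arr)-1.
import Mathlib
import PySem

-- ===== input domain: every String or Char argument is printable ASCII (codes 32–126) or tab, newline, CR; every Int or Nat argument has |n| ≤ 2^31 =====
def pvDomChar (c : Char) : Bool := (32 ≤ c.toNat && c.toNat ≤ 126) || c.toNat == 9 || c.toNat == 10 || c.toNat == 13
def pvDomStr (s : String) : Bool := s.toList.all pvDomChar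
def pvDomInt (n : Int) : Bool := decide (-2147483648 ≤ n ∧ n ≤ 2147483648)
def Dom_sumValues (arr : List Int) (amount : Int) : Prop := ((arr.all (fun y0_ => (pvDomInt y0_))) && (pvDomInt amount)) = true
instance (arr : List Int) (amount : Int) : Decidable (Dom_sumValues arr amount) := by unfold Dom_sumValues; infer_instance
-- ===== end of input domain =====

-- B splits A's fused accumulate-and-break loop into two phases: build the full prefix-sum table, then scan it for the first exceeding index; return value equivalence on nonempty lists.


-- ===== PORT A =====
-- A's loop: break once total > amount, else add and bump step.
def sumValuesLoop (amount : Int) : Int → Int → List Int → Int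
  | _, step, [] => step
  | total, step, i :: rest =>
    if total > amount then step
    else sumValuesLoop amount (total + i) (step + 1) rest

def sumValues (arr : List Int) (amount : Int) : Int :=
  match arr with
  | [] => 0  -- Python raises IndexError here; excluded by Pre_sumValues
  | a :: rest => sumValuesLoop amount a 0 rest

-- ===== PORT B =====
-- Phase 1 of B: the full prefix-sum table.
def buildPrefix : Int → List Int → List Int
  | t, [] => [t]
  | t, x :: xs => t :: buildPrefix (t + x) xs

-- Phase 2 of B: first index in the given (truncated) table exceeding amount, else fallback.
def findStep (amount : Int) : List Int → Int → Int → Int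
  | [], _, fb => fb
  | p :: ps, k, fb => if p > amount then k else findStep amount ps (k + 1) fb

def sumValues_alt (arr : List Int) (amount : Int) : Int :=
  match arr with
  | [] => 0  -- Python raises IndexError here; excluded by Pre_sumValues
  | a :: rest =>
    findStep amount ((buildPrefix a rest).dropLast) 0 ((a :: rest).length - 1)

-- ===== PRECONDITION & SPEC =====
-- Pre_ excludes only the empty list, on which Python A (and B) raise IndexError.
def Pre_sumValues (arr : List Int) (amount : Int) : Prop := arr ≠ []
instance (arr : List Int) (amount : Int) : Decidable (Pre_sumValues arr amount) := by unfold Pre_sumValues; infer_instance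
def pvWitness_sumValues : List Int × Int := ([1, 2, 3], 2)

def Spec_sumValues (arr : List Int) (amount : Int) (out : Int) : Prop := out = sumValues_alt arr amount
instance (arr : List Int) (amount : Int) (out : Int) : Decidable (Spec_sumValues arr amount out) := by unfold Spec_sumValues; infer_instance

-- ===== CLAIM (what is proved, stated in full; the proofs are below) =====
def Claim_equal_sumValues : Prop := ∀ (arr : List Int) (amount : Int), Dom_sumValues arr amount → Pre_sumValues arr amount → Spec_sumValues arr amount (sumValues arr amount)

-- ===== LEMMAS AND PROOFS =====
theorem buildPrefix_ne_nil (t : Int) (xs : List Int) : buildPrefix t xs ≠ [] := by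
  cases xs <;> simp [buildPrefix]

theorem loop_eq_findStep (amount t s : Int) (rest : List Int) :
    sumValuesLoop amount t s rest =
      findStep amount ((buildPrefix t rest).dropLast) s (s + rest.length) := by
  induction rest generalizing t s with
  | nil => simp [sumValuesLoop, buildPrefix, findStep]
  | cons x xs ih =>
    have h : (buildPrefix t (x :: xs)).dropLast = t :: (buildPrefix (t + x) xs).dropLast := by
      simp [buildPrefix, List.dropLast_cons_of_ne_nil (buildPrefix_ne_nil _ _)]
    rw [h]
    simp only [sumValuesLoop, findStep]
    split
    · rfl
    · rw [ih]
      congr 1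
      simp
      ring

-- ===== VERDICT (by name: the statement is the Claim_ definition above) =====
theorem sumValues_spec : Claim_equal_sumValues := by
  intro arr amount _ hpre
  unfold Spec_sumValues
  match arr with
  | [] => exact absurd rfl hpre
  | a :: rest =>
    simp only [sumValues, sumValues_alt]
    rw [loop_eq_findStep]
    congr 1
    simp
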